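-- pv_equiv track=rewrite | github.com/bestolkovy/Xexlet_module2 | 2 functions/lesson13.py | filter_positive
-- ===== SOURCE A (Python) =====
-- def filter_positive(listo):
--     if not listo:
--         return []
--     head, *tail = listo
--     if head > 0:
--         return [head] + filter_positive(tail)
--     else:
--         return filter_positive(tail)
-- ===== SOURCE B (Python) =====
-- def filter_positive(listo):
--     result = []
--     for x in listo:
--         if x > 0:
--             result.append(x)
--     return result
-- ===== Notes on version B (the rewrite author's own statement) =====
-- stated objective: faster
-- what changed: Replaces A's head/tail recursion that concatenates singleton lists with a single iterative for-loop appending into an accumulator.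
import Mathlib
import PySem

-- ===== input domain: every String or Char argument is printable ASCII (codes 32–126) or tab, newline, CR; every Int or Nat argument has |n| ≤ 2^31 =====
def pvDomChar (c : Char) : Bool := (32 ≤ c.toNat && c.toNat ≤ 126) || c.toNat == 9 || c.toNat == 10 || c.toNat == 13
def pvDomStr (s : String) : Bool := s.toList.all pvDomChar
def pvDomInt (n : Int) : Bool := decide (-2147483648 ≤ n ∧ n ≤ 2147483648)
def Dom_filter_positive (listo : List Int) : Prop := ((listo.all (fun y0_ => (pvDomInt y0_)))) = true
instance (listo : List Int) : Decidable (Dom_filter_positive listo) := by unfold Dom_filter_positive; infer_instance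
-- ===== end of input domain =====

-- B replaces A's head/tail recursion (singleton-list concatenations) with one iterative
-- accumulator loop; objective: simpler.

-- ===== PORT A =====
-- A: if list empty return []; else split head/tail, cons head iff head > 0, recurse on tail.
def filter_positive (listo : List Int) : List Int :=
  match listo with
  | [] => []
  | head :: tail =>
    if head > 0 then [head] ++ filter_positive tail
    else filter_positive tail

-- ===== PORT B =====
-- B: result = []; for x in listo: if x > 0: result.append(x); return result.
def filter_positive_alt (listo : List Int) : List Int :=
  listo.foldl (fun result x => if x > 0 then result ++ [x] else result) []

-- ===== PRECONDITION & SPEC =====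
def Spec_filter_positive (listo : List Int) (out : List Int) : Prop := out = filter_positive_alt listo
instance (listo : List Int) (out : List Int) : Decidable (Spec_filter_positive listo out) := by unfold Spec_filter_positive; infer_instance

-- ===== CLAIM (what is proved, stated in full; the proofs are below) =====
def Claim_equal_filter_positive : Prop := ∀ (listo : List Int), Dom_filter_positive listo → Spec_filter_positive listo (filter_positive listo)

-- ===== LEMMAS AND PROOFS =====
theorem filter_positive_foldl (listo acc : List Int) :
    listo.foldl (fun result x => if x > 0 then result ++ [x] else result) acc
      = acc ++ filter_positive listo := by
  induction listo generalizing acc with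
  | nil => simp [filter_positive]
  | cons h t ih =>
    simp only [List.foldl_cons, filter_positive]
    by_cases hp : h > 0 <;> simp [hp, ih]

-- ===== VERDICT (by name: the statement is the Claim_ definition above) =====
theorem filter_positive_spec : Claim_equal_filter_positive := by
  intro listo _
  unfold Spec_filter_positive filter_positive_alt
  rw [filter_positive_foldl]
  simp
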